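-- pv_equiv track=rewrite | github.com/htang7415/MaxionBench | maxionbench/orchestration/slurm/submit_plan.py | _indices_to_array_spec
-- ===== SOURCE A (Python) =====
-- def _indices_to_array_spec(indices: list[int]) -> str:
--     if not indices:
--         raise ValueError("array spec requires at least one index")
--     ordered = sorted(set(int(item) for item in indices))
--     ranges: list[str] = []
--     start = ordered[0]
--     prev = ordered[0]
--     for item in ordered[1:]:
--         if item == prev + 1:
--             prev = item
--             continue
--         ranges.append(f"{start}-{prev}" if start != prev else str(start))
--         start = item
--         prev = item
--     ranges.append(f"{start}-{prev}" if start != prev else str(start))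
--     return ",".join(ranges)
-- ===== SOURCE B (Python) =====
-- def _indices_to_array_spec(indices: list[int]) -> str:
--     if not indices:
--         raise ValueError("array spec requires at least one index")
--     s = {int(item) for item in indices}
--     starts = sorted(x for x in s if x - 1 not in s)
--     ends = sorted(x for x in s if x + 1 not in s)
--     return ",".join(f"{a}-{b}" if a != b else str(a) for a, b in zip(starts, ends))
-- ===== Notes on version B (the rewrite author's own statement) =====
-- stated objective: alternative
-- what changed: replaces the sequential prev/start run-tracking loop by a set-membership characterization: run starts are elements x with x-1 not in the set, run ends those with x+1 not in the set, zipped together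
import Mathlib
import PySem

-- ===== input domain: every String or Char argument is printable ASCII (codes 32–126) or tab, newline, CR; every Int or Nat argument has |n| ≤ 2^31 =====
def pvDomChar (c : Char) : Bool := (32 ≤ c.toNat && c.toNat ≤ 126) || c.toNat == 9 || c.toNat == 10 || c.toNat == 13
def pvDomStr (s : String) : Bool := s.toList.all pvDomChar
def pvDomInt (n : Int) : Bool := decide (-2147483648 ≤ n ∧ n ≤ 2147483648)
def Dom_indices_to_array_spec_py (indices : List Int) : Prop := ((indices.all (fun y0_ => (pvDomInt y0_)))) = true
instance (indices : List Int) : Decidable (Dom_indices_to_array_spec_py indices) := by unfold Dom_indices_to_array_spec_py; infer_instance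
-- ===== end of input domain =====

-- B replaces A's sequential prev/start run-tracking loop by a set-membership
-- characterization of run starts (x-1 not in set) and run ends (x+1 not in set); alternative, same cost.


-- ===== PORT A =====
-- f"{start}-{prev}" if start != prev else str(start)   (identical in both Pythons)
def pvFmt (start prev : Int) : String :=
  if start ≠ prev then String.ofList (PySem.Int.toChars start ++ '-' :: PySem.Int.toChars prev)
  else PySem.Int.toStr start

-- A's for-loop over ordered[1:] carrying (ranges, start, prev), plus the trailing append
def pvLoopA : List String → Int → Int → List Int → List String
  | ranges, start, prev, [] => ranges ++ [pvFmt start prev]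
  | ranges, start, prev, item :: rest =>
      if item = prev + 1 then pvLoopA ranges start item rest
      else pvLoopA (ranges ++ [pvFmt start prev]) item item rest

def indices_to_array_spec_py (indices : List Int) : String :=
  if indices = [] then ""  -- Python raises ValueError here; excluded by Pre_
  else
    match PySem.List.sorted (PySem.Set.ofList indices) (fun x => x) false with
    | [] => ""  -- unreachable: sorted set of a nonempty list is nonempty
    | o0 :: rest => PySem.Str.join "," (pvLoopA [] o0 o0 rest)

-- ===== PORT B =====
def indices_to_array_spec_py_alt (indices : List Int) : String :=
  if indices = [] then ""  -- Python raises ValueError here; excluded by Pre_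
  else
    let s := PySem.Set.ofList indices
    let starts := PySem.List.sorted (s.filter (fun x => !(PySem.Set.contains s (x - 1)))) (fun x => x) false
    let ends := PySem.List.sorted (s.filter (fun x => !(PySem.Set.contains s (x + 1)))) (fun x => x) false
    PySem.Str.join "," ((starts.zip ends).map (fun p => pvFmt p.1 p.2))

-- ===== PRECONDITION & SPEC =====
-- Pre_ excludes only the empty list, on which Python A raises ValueError.
def Pre_indices_to_array_spec_py (indices : List Int) : Prop := indices ≠ []
instance (indices : List Int) : Decidable (Pre_indices_to_array_spec_py indices) := by unfold Pre_indices_to_array_spec_py; infer_instance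
def pvWitness_indices_to_array_spec_py : List Int := [3, 4, 5, 9, -1, 0]

def Spec_indices_to_array_spec_py (indices : List Int) (out : String) : Prop := out = indices_to_array_spec_py_alt indices
instance (indices : List Int) (out : String) : Decidable (Spec_indices_to_array_spec_py indices out) := by unfold Spec_indices_to_array_spec_py; infer_instance

-- ===== CLAIM (what is proved, stated in full; the proofs are below) =====
def Claim_equal_indices_to_array_spec_py : Prop := ∀ (indices : List Int), Dom_indices_to_array_spec_py indices → Pre_indices_to_array_spec_py indices → Spec_indices_to_array_spec_py indices (indices_to_array_spec_py indices)

-- ===== LEMMAS AND PROOFS =====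

-- the maximal consecutive runs of a strictly increasing list, as (start, end) pairs
def pvRuns : Int → Int → List Int → List (Int × Int)
  | start, prev, [] => [(start, prev)]
  | start, prev, x :: rest =>
      if x = prev + 1 then pvRuns start x rest else (start, prev) :: pvRuns x x rest

theorem pvLoopA_eq_runs (t : List Int) (ranges : List String) (start prev : Int) :
    pvLoopA ranges start prev t = ranges ++ (pvRuns start prev t).map (fun p => pvFmt p.1 p.2) := by
  induction t generalizing ranges start prev with
  | nil => simp [pvLoopA, pvRuns]
  | cons x rest ih =>
      simp only [pvLoopA, pvRuns]
      split_ifs with h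
      · exact ih ..
      · rw [ih]; simp

theorem pvRuns_snd (t : List Int) (s s' p : Int) :
    (pvRuns s p t).map Prod.snd = (pvRuns s' p t).map Prod.snd := by
  induction t generalizing s s' p with
  | nil => simp [pvRuns]
  | cons x rest ih =>
      simp only [pvRuns]
      split_ifs with h
      · exact ih ..
      · simp

theorem pvRuns_fst (t : List Int) (s p : Int) :
    (pvRuns s p t).map Prod.fst = s :: ((pvRuns p p t).map Prod.fst).tail := by
  induction t generalizing s p with
  | nil => simp [pvRuns]
  | cons x rest ih =>
      simp only [pvRuns]
      split_ifs with h
      · rw [ih s x, ih p x]; simp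
      · simp

theorem pvNotContains (l : List Int) (y : Int) (h : y ∉ l) : (!l.contains y) = true := by
  simp [List.contains_eq_mem, h]

theorem pvStarts_eq (t : List Int) (h : Int) (hp : (h :: t).Pairwise (· < ·)) :
    (h :: t).filter (fun x => !((h :: t).contains (x - 1))) = (pvRuns h h t).map Prod.fst := by
  induction t generalizing h with
  | nil =>
      rw [List.filter_cons_of_pos (p := fun z => !([h].contains (z - 1)))
            (pvNotContains _ _ (by simp))]
      simp [pvRuns]
  | cons x rest ih =>
      have hx : h < x := (List.pairwise_cons.mp hp).1 x (by simp)
      have hrest : ∀ y ∈ rest, x < y := (List.pairwise_cons.mp (List.pairwise_cons.mp hp).2).1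
      have hrest' : ∀ y ∈ rest, h < y := fun y hy => lt_trans hx (hrest y hy)
      have htail : (x :: rest).Pairwise (· < ·) := (List.pairwise_cons.mp hp).2
      have hh : h - 1 ∉ h :: x :: rest := by
        intro hc
        rcases List.mem_cons.mp hc with h1 | hc
        · omega
        rcases List.mem_cons.mp hc with h1 | hc
        · omega
        · have := hrest' _ hc; omega
      have hxlocal : x - 1 ∉ x :: rest := by
        intro hc
        rcases List.mem_cons.mp hc with h1 | hc
        · omega
        · have := hrest _ hc; omega
      have hcong : ∀ y ∈ rest,
          (!((h :: x :: rest).contains (y - 1))) = (!((x :: rest).contains (y - 1))) := by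
        intro y hy
        have hyx : x < y := hrest y hy
        simp only [List.contains_cons]
        have : (y - 1 == h) = false := by simp; omega
        rw [this]; simp
      have ihx := ih x htail
      have hloc : (x :: rest).filter (fun y => !((x :: rest).contains (y - 1)))
          = x :: rest.filter (fun y => !((x :: rest).contains (y - 1))) :=
        List.filter_cons_of_pos (p := fun z => !((x :: rest).contains (z - 1)))
          (pvNotContains _ _ hxlocal)
      rw [hloc] at ihx
      by_cases hxh : x = h + 1
      · have hxfail : x - 1 ∈ h :: x :: rest := by
          apply List.mem_cons.mpr; left; omega
        rw [List.filter_cons_of_pos (p := fun z => !((h :: x :: rest).contains (z - 1)))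
              (pvNotContains _ _ hh),
            List.filter_cons_of_neg (p := fun z => !((h :: x :: rest).contains (z - 1)))
              (by simp [List.contains_eq_mem, hxfail]),
            List.filter_congr (fun y hy => by rw [hcong y hy])]
        simp only [pvRuns, if_pos hxh]
        rw [pvRuns_fst rest h x, ← ihx]
        simp
      · have hxpass : x - 1 ∉ h :: x :: rest := by
          intro hc
          rcases List.mem_cons.mp hc with h1 | hc
          · omega
          rcases List.mem_cons.mp hc with h1 | hc
          · omega
          · have := hrest _ hc; omega
        rw [List.filter_cons_of_pos (p := fun z => !((h :: x :: rest).contains (z - 1)))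
              (pvNotContains _ _ hh),
            List.filter_cons_of_pos (p := fun z => !((h :: x :: rest).contains (z - 1)))
              (pvNotContains _ _ hxpass),
            List.filter_congr (fun y hy => by rw [hcong y hy])]
        simp only [pvRuns, if_neg hxh, List.map_cons]
        rw [← ihx]

theorem pvEnds_eq (t : List Int) (h : Int) (hp : (h :: t).Pairwise (· < ·)) :
    (h :: t).filter (fun x => !((h :: t).contains (x + 1))) = (pvRuns h h t).map Prod.snd := by
  induction t generalizing h with
  | nil =>
      rw [List.filter_cons_of_pos (p := fun z => !([h].contains (z + 1)))
            (pvNotContains _ _ (by simp))]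
      simp [pvRuns]
  | cons x rest ih =>
      have hx : h < x := (List.pairwise_cons.mp hp).1 x (by simp)
      have hrest : ∀ y ∈ rest, x < y := (List.pairwise_cons.mp (List.pairwise_cons.mp hp).2).1
      have htail : (x :: rest).Pairwise (· < ·) := (List.pairwise_cons.mp hp).2
      have hcong : ∀ y ∈ x :: rest,
          (!((h :: x :: rest).contains (y + 1))) = (!((x :: rest).contains (y + 1))) := by
        intro y hy
        have hyx : x ≤ y := by
          rcases List.mem_cons.mp hy with rfl | hmem
          · exact le_refl _
          · exact le_of_lt (hrest y hmem)
        simp only [List.contains_cons]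
        have : (y + 1 == h) = false := by simp; omega
        rw [this]; simp
      have ihx := ih x htail
      by_cases hxh : x = h + 1
      · have hhfail : h + 1 ∈ h :: x :: rest := by
          apply List.mem_cons.mpr; right; apply List.mem_cons.mpr; left; omega
        rw [List.filter_cons_of_neg (p := fun z => !((h :: x :: rest).contains (z + 1)))
              (by simp [List.contains_eq_mem, hhfail]),
            List.filter_congr hcong, ihx]
        simp only [pvRuns, if_pos hxh]
        exact pvRuns_snd rest x h x
      · have hhpass : h + 1 ∉ h :: x :: rest := by
          intro hc
          rcases List.mem_cons.mp hc with h1 | hc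
          · omega
          rcases List.mem_cons.mp hc with h1 | hc
          · omega
          · have := hrest _ hc; omega
        rw [List.filter_cons_of_pos (p := fun z => !((h :: x :: rest).contains (z + 1)))
              (pvNotContains _ _ hhpass),
            List.filter_congr hcong, ihx]
        simp [pvRuns, if_neg hxh]

theorem pvSorted_filter (indices : List Int) (p : Int → Bool) :
    PySem.List.sorted ((PySem.Set.ofList indices).filter p) (fun x => x) false
      = (PySem.List.sorted (PySem.Set.ofList indices) (fun x => x) false).filter p := by
  apply PySem.List.sorted_eq_of_perm_of_pairwise_lt
  · exact ((PySem.List.sorted_perm (PySem.Set.ofList indices) (fun x => x) false).filter p)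
  · exact List.Pairwise.sublist List.filter_sublist (PySem.List.sorted_ofList_pairwise_lt indices)

-- ===== VERDICT (by name: the statement is the Claim_ definition above) =====
theorem indices_to_array_spec_py_spec : Claim_equal_indices_to_array_spec_py := by
  intro indices _ hpre
  have hne : indices ≠ [] := hpre
  unfold Spec_indices_to_array_spec_py indices_to_array_spec_py indices_to_array_spec_py_alt
  rw [if_neg hne, if_neg hne]
  rcases ho : PySem.List.sorted (PySem.Set.ofList indices) (fun x => x) false with _ | ⟨o0, rest⟩
  · exfalso
    rcases indices with _ | ⟨a, t⟩
    · exact hne rfl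
    · have ha : a ∈ PySem.Set.ofList (a :: t) := by rw [PySem.Set.mem_ofList]; simp
      have hmem : a ∈ PySem.List.sorted (PySem.Set.ofList (a :: t)) (fun x => x) false := by
        rw [PySem.List.mem_sorted]; exact ha
      rw [ho] at hmem; simp at hmem
  · have hpw : (o0 :: rest).Pairwise (· < ·) := by
      rw [← ho]; exact PySem.List.sorted_ofList_pairwise_lt indices
    show PySem.Str.join "," (pvLoopA [] o0 o0 rest) = _
    rw [pvLoopA_eq_runs]
    simp only [List.nil_append]
    have hmem' : ∀ y : Int, (y ∈ PySem.Set.ofList indices) ↔ (y ∈ o0 :: rest) := by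
      intro y; rw [← ho, PySem.List.mem_sorted]
    have hmemb : ∀ y : Int,
        PySem.Set.contains (PySem.Set.ofList indices) y = (o0 :: rest).contains y := by
      intro y
      simp only [PySem.Set.contains, List.contains_eq_mem]
      exact decide_eq_decide.mpr (hmem' y)
    have hbs : (PySem.Set.ofList indices).filter
          (fun x => !(PySem.Set.contains (PySem.Set.ofList indices) (x - 1)))
        = (PySem.Set.ofList indices).filter (fun x => !((o0 :: rest).contains (x - 1))) :=
      List.filter_congr (fun y _ => by rw [hmemb])
    have hbe : (PySem.Set.ofList indices).filter
          (fun x => !(PySem.Set.contains (PySem.Set.ofList indices) (x + 1)))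
        = (PySem.Set.ofList indices).filter (fun x => !((o0 :: rest).contains (x + 1))) :=
      List.filter_congr (fun y _ => by rw [hmemb])
    show _ = PySem.Str.join "," (List.map (fun p => pvFmt p.1 p.2) (List.zip _ _))
    rw [hbs, hbe, pvSorted_filter, pvSorted_filter, ho,
        pvStarts_eq rest o0 hpw, pvEnds_eq rest o0 hpw, List.zip_map']
    simp
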